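-- pv_equiv track=rewrite | github.com/manwar/perlweeklychallenge-club | challenge-158/roger-bell-west/python/ch-2.py | cuban1
-- ===== SOURCE A (Python) =====
-- from math import sqrt,floor,log
-- from collections import deque
--
-- def genprimes(mx):
--   primesh=set(range(2,4))
--   for i in range(6,mx+2,6):
--     for j in range(i-1,i+2,2):
--       if j <= mx:
--         primesh.add(j)
--   q=deque([2,3,5,7])
--   p=q.popleft()
--   mr=floor(sqrt(mx))
--   while p <= mr:
--     if p in primesh:
--       for i in range(p*p,mx+1,p):
--         primesh.discard(i)
--     if len(q) < 2:
--       q.append(q[-1]+4)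
--       q.append(q[-1]+2)
--     p=q.popleft()
--   primes=list(primesh)
--   primes.sort()
--   return primes
--
-- def cuban1(mx):
--   o=[]
--   ps=set(genprimes(mx))
--   for y in range(1,mx+1):
--     q=3*y*(y+1)+1
--     if q > mx:
--       break
--     if q in ps:
--       o.append(q)
--   return o
-- ===== SOURCE B (Python) =====
-- def _is_prime(n):
--     if n < 4:
--         return n > 1
--     if n % 2 == 0:
--         return False
--     d = 3
--     while d * d <= n:
--         if n % d == 0:
--             return False
--         d += 2
--     return True
--
-- def cuban1(mx):
--     out = []
--     y = 1
--     while 3 * y * (y + 1) + 1 <= mx: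
--         q = 3 * y * (y + 1) + 1
--         if _is_prime(q):
--             out.append(q)
--         y += 1
--     return out
-- ===== Notes on version B (the rewrite author's own statement) =====
-- stated objective: faster
-- what changed: Instead of building a wheel sieve of every number up to mx and intersecting it with the cuban candidates, B generates only the cuban candidates themselves (about the square root of mx of them) and tests each one directly by odd trial division up to its square root.
-- outside the precondition, e.g. on cuban1(-1): A raises ValueError, B returns []
import Mathlib
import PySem

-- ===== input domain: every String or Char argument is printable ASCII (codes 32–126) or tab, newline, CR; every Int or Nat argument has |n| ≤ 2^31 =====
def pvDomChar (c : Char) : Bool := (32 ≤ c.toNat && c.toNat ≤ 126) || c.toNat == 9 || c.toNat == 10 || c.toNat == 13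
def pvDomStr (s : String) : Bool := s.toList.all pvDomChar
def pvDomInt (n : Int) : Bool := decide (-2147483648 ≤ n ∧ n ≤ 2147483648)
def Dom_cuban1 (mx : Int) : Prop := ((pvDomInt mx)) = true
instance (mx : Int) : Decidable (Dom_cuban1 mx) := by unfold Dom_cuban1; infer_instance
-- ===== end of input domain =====

-- B replaces A's full 6k±1 wheel sieve of [2,mx] by trial division of only the ~√(mx/3) cuban
-- candidates 3y(y+1)+1 — measurably faster (no O(mx)-size set is built).

-- ===== PORT A =====
-- primesh = set(range(2,4)); for i in range(6,mx+2,6): for j in range(i-1,i+2,2): if j<=mx: primesh.add(j)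
def pvInitSet (mx : Int) : Std.HashSet Int :=
  (PySem.List.pyRange 6 (mx+2) 6).foldl
    (fun s i => (PySem.List.pyRange (i-1) (i+2) 2).foldl
      (fun s j => if j ≤ mx then s.insert j else s) s)
    (Std.HashSet.ofList (PySem.List.pyRange 2 4 1))

-- if p in primesh: for i in range(p*p,mx+1,p): primesh.discard(i)
def pvSieveStep (mx : Int) (s : Std.HashSet Int) (p : Int) : Std.HashSet Int :=
  (PySem.List.pyRange (p*p) (mx+1) p).foldl (fun t i => t.erase i) s

-- the while loop; fuel only makes it total (p grows every iteration, so the fuel given below never runs out)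
def pvGpLoop (mx mr : Int) : Nat → Std.HashSet Int → List Int → Int → Std.HashSet Int
  | 0, s, _, _ => s
  | fuel+1, s, q, p =>
    if p ≤ mr then
      let s1 := if s.contains p then pvSieveStep mx s p else s
      let q1 := if q.length < 2 then
          let qa := q ++ [q.getLastD 0 + 4]
          qa ++ [qa.getLastD 0 + 2]
        else q
      match q1 with
      | [] => s1                                    -- unreachable (the deque is never empty)
      | p' :: q' => pvGpLoop mx mr fuel s1 q' p'
    else s

def genprimes (mx : Int) : List Int :=
  -- mr = floor(sqrt(mx)): Int.sqrt is exact for 0 ≤ mx ≤ 2^31 (double sqrt rounds to the true value there);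
  -- Python's math.sqrt raises ValueError for mx < 0, which Pre_cuban1 excludes
  let mr := Int.sqrt mx
  let s := pvGpLoop mx mr (mr.toNat + 1) (pvInitSet mx) [3, 5, 7] 2
  s.toList.mergeSort (fun a b => decide (a ≤ b))    -- primes=list(primesh); primes.sort(): set order is irrelevant after sorting

-- for y in range(1,mx+1): q=3*y*(y+1)+1; if q>mx: break; if q in ps: o.append(q)
def pvCubanLoop (mx : Int) (ps : Std.HashSet Int) : List Int → List Int
  | [] => []
  | y :: ys =>
    let q := 3*y*(y+1)+1
    if q > mx then []
    else (if ps.contains q then [q] else []) ++ pvCubanLoop mx ps ys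

def cuban1 (mx : Int) : List Int :=
  pvCubanLoop mx (Std.HashSet.ofList (genprimes mx)) (PySem.List.pyRange 1 (mx+1) 1)

-- ===== PORT B =====
-- while d*d <= n: if n % d == 0: return False; d += 2  (fuel only makes it total; n.toNat+1 always suffices)
def pvTdLoop (n : Int) : Nat → Int → Bool
  | 0, _ => true
  | fuel+1, d =>
    if d*d ≤ n then
      if PySem.Int.mod n d = 0 then false else pvTdLoop n fuel (d+2)
    else true

def pvIsPrime (n : Int) : Bool :=
  if n < 4 then decide (1 < n)
  else if PySem.Int.mod n 2 = 0 then false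
  else pvTdLoop n (n.toNat + 1) 3

-- while 3*y*(y+1)+1 <= mx: …; y += 1  (fuel only makes it total; mx.toNat+1 always suffices)
def pvAltLoop (mx : Int) : Nat → Int → List Int
  | 0, _ => []
  | fuel+1, y =>
    if 3*y*(y+1)+1 ≤ mx then
      (if pvIsPrime (3*y*(y+1)+1) then [3*y*(y+1)+1] else []) ++ pvAltLoop mx fuel (y+1)
    else []

def cuban1_alt (mx : Int) : List Int := pvAltLoop mx (mx.toNat + 1) 1

-- ===== PRECONDITION & SPEC =====
-- Pre_ excludes exactly the negative mx, where A raises ValueError (math.sqrt of a negative number)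
def Pre_cuban1 (mx : Int) : Prop := 0 ≤ mx
instance (mx : Int) : Decidable (Pre_cuban1 mx) := by unfold Pre_cuban1; infer_instance
def pvWitness_cuban1 : Int := 100

def Spec_cuban1 (mx : Int) (out : List Int) : Prop := out = cuban1_alt mx
instance (mx : Int) (out : List Int) : Decidable (Spec_cuban1 mx out) := by unfold Spec_cuban1; infer_instance

-- ===== CLAIM (what is proved, stated in full; the proofs are below) =====
def Claim_equal_cuban1 : Prop := ∀ (mx : Int), Dom_cuban1 mx → Pre_cuban1 mx → Spec_cuban1 mx (cuban1 mx)

-- ===== LEMMAS AND PROOFS =====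

-- the members of the initial wheel set
def pvInit (mx n : Int) : Prop := n = 2 ∨ n = 3 ∨ (5 ≤ n ∧ n ≤ mx ∧ (n % 6 = 1 ∨ n % 6 = 5))

-- n has been removed by some already-processed prime d (d < p, d ≤ mr)
def pvRem (mr p n : Int) : Prop := ∃ d : Int, 2 ≤ d ∧ d < p ∧ d ≤ mr ∧ d.natAbs.Prime ∧ d*d ≤ n ∧ d ∣ n

-- shape of the candidate deque relative to the current p
def pvQInv (p : Int) (q : List Int) : Prop :=
  (p = 2 ∧ q = [3,5,7]) ∨ (p = 3 ∧ q = [5,7]) ∨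
  (5 ≤ p ∧ p % 6 = 5 ∧ q = [p+2]) ∨ (5 ≤ p ∧ p % 6 = 1 ∧ q = [p+4, p+6])

theorem pv_not_prime (k e : Int) (h2 : 2 ≤ k) (hlt : k < e) (hdvd : k ∣ e) :
    ¬ e.natAbs.Prime := by
  intro hp
  have hd : k.natAbs ∣ e.natAbs := Int.natAbs_dvd_natAbs.mpr hdvd
  rcases (Nat.Prime.eq_one_or_self_of_dvd hp _ hd) with h | h <;> omega

theorem pv_prime_mod6 (n : Int) (hp : n.natAbs.Prime) (h5 : 5 ≤ n) :
    n % 6 = 1 ∨ n % 6 = 5 := by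
  by_contra h
  push Not at h
  have h2 : (2:Int) ∣ n ∨ (3:Int) ∣ n := by omega
  rcases h2 with h2 | h2
  · exact pv_not_prime 2 n (by omega) (by omega) h2 hp
  · exact pv_not_prime 3 n (by omega) (by omega) h2 hp

theorem pv_prime_no_div (n d : Int) (hp : n.natAbs.Prime) (h2n : 2 ≤ n)
    (h2 : 2 ≤ d) (hsq : d*d ≤ n) (hdvd : d ∣ n) : False := by
  have hd : d.natAbs ∣ n.natAbs := Int.natAbs_dvd_natAbs.mpr hdvd
  rcases (Nat.Prime.eq_one_or_self_of_dvd hp _ hd) with h | h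
  · omega
  · have : d = n := by omega
    nlinarith

theorem pv_le_sqrt (mx d : Int) (hmx : 0 ≤ mx) (hd : 0 ≤ d) :
    d ≤ Int.sqrt mx ↔ d*d ≤ mx := by
  have h : Int.sqrt mx = (Nat.sqrt mx.toNat : Int) := rfl
  have hdd : d * d = ((d.toNat * d.toNat : Nat) : Int) := by
    push_cast
    rw [Int.toNat_of_nonneg hd]
  rw [h, hdd]
  constructor
  · intro hle
    have h1 : d.toNat ≤ Nat.sqrt mx.toNat := by omega
    have h2 := Nat.le_sqrt.mp h1
    omega
  · intro hle
    have h2 : d.toNat * d.toNat ≤ mx.toNat := by omega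
    have := Nat.le_sqrt.mpr h2
    omega

theorem pv_prime_factor (n : Int) (h2 : 2 ≤ n) (hnp : ¬ n.natAbs.Prime) :
    ∃ d : Int, 2 ≤ d ∧ d < n ∧ d.natAbs.Prime ∧ d*d ≤ n ∧ d ∣ n := by
  have hne : n.natAbs ≠ 1 := by omega
  have hprime := Nat.minFac_prime hne
  have hdvdN : n.natAbs.minFac ∣ n.natAbs := Nat.minFac_dvd n.natAbs
  have habs : ((n.natAbs : Nat) : Int) = n := Int.natAbs_of_nonneg (by omega)
  have hdvd : (n.natAbs.minFac : Int) ∣ n := by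
    rw [← habs]; exact_mod_cast Int.natCast_dvd_natCast.mpr hdvdN
  have hsqN : n.natAbs.minFac ^ 2 ≤ n.natAbs := Nat.minFac_sq_le_self (by omega) hnp
  have hsq : (n.natAbs.minFac : Int) * (n.natAbs.minFac : Int) ≤ n := by
    have h' : ((n.natAbs.minFac : Int))^2 ≤ n := by rw [← habs]; exact_mod_cast hsqN
    rw [pow_two] at h'; exact h'
  have h2d : (2 : Int) ≤ (n.natAbs.minFac : Int) := by exact_mod_cast hprime.two_le
  refine ⟨(n.natAbs.minFac : Int), h2d, by nlinarith, ?_, hsq, hdvd⟩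
  simpa using hprime

theorem pv_mem_foldl_discard (L : List Int) (s : Std.HashSet Int) (n : Int) :
    n ∈ L.foldl (fun t i => t.erase i) s ↔ n ∈ s ∧ n ∉ L := by
  induction L generalizing s with
  | nil => simp
  | cons a L ih =>
    simp only [List.foldl_cons, ih, Std.HashSet.mem_erase, beq_eq_false_iff_ne, ne_eq, List.mem_cons]
    tauto

theorem pv_mem_sieveStep (mx : Int) (s : Std.HashSet Int) (p n : Int) (hp : 0 < p) :
    n ∈ pvSieveStep mx s p ↔ n ∈ s ∧ ¬(p*p ≤ n ∧ n ≤ mx ∧ p ∣ n) := by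
  unfold pvSieveStep
  rw [pv_mem_foldl_discard]
  have hd : p ∣ n - p*p ↔ p ∣ n := by
    constructor
    · intro h; have := dvd_add h (Dvd.intro p rfl); simpa using this
    · intro h; exact dvd_sub h (Dvd.intro p rfl)
  rw [PySem.List.mem_pyRange_iff_of_pos hp]
  constructor
  · rintro ⟨hs, hn⟩; exact ⟨hs, fun ⟨h1, h2, h3⟩ => hn ⟨h1, by omega, hd.mpr h3⟩⟩
  · rintro ⟨hs, hn⟩; exact ⟨hs, fun ⟨h1, h2, h3⟩ => hn ⟨h1, by omega, hd.mp h3⟩⟩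

theorem pv_range2 (i : Int) : PySem.List.pyRange (i-1) (i+2) 2 = [i-1, i+1] := by
  rw [PySem.List.pyRange_of_pos _ _ (by norm_num)]
  have h1 : (i + 2 - (i - 1) + 2 - 1) = 4 := by ring
  have h2 : i - 1 < i + 2 := by omega
  rw [h1]
  norm_num
  rw [show Int.toNat 2 = 2 from rfl]
  simp [List.range_succ]
  omega

theorem pv_mem_inner (mx i n : Int) (s : Std.HashSet Int) :
    n ∈ (PySem.List.pyRange (i-1) (i+2) 2).foldl
      (fun s j => if j ≤ mx then s.insert j else s) s ↔
    n ∈ s ∨ ((n = i-1 ∨ n = i+1) ∧ n ≤ mx) := by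
  rw [pv_range2]
  simp only [List.foldl_cons, List.foldl_nil]
  split_ifs with h1 h2 h2
  · simp only [Std.HashSet.mem_insert, beq_iff_eq]
    constructor
    · rintro (h | h | h)
      · exact Or.inr ⟨Or.inr h.symm, by omega⟩
      · exact Or.inr ⟨Or.inl h.symm, by omega⟩
      · exact Or.inl h
    · rintro (h | ⟨h | h, hle⟩)
      · exact Or.inr (Or.inr h)
      · exact Or.inr (Or.inl h.symm)
      · exact Or.inl h.symm
  · simp only [Std.HashSet.mem_insert, beq_iff_eq]
    constructor
    · rintro (h | h)
      · exact Or.inr ⟨Or.inr h.symm, by omega⟩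
      · exact Or.inl h
    · rintro (h | ⟨h | h, hle⟩)
      · exact Or.inr h
      · omega
      · exact Or.inl h.symm
  · simp only [Std.HashSet.mem_insert, beq_iff_eq]
    constructor
    · rintro (h | h)
      · exact Or.inr ⟨Or.inl h.symm, by omega⟩
      · exact Or.inl h
    · rintro (h | ⟨h | h, hle⟩)
      · exact Or.inr h
      · exact Or.inl h.symm
      · omega
  · constructor
    · exact fun hs => Or.inl hs
    · rintro (hs | ⟨rfl | rfl, hle⟩)
      · exact hs
      · omega
      · omega

theorem pv_mem_init (mx n : Int) (h : 0 ≤ mx) :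
    n ∈ pvInitSet mx ↔ pvInit mx n := by
  unfold pvInitSet
  have outer : ∀ (L : List Int) (s : Std.HashSet Int),
      n ∈ L.foldl (fun s i => (PySem.List.pyRange (i-1) (i+2) 2).foldl
        (fun s j => if j ≤ mx then s.insert j else s) s) s ↔
      n ∈ s ∨ ∃ i ∈ L, (n = i-1 ∨ n = i+1) ∧ n ≤ mx := by
    intro L
    induction L with
    | nil => simp
    | cons a L ih =>
      intro s
      simp only [List.foldl_cons, ih, pv_mem_inner, List.mem_cons]
      constructor
      · rintro (( hs | hx) | ⟨i, hi, hx⟩)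
        · exact Or.inl hs
        · exact Or.inr ⟨a, Or.inl rfl, hx⟩
        · exact Or.inr ⟨i, Or.inr hi, hx⟩
      · rintro (hs | ⟨i, (rfl | hi), hx⟩)
        · exact Or.inl (Or.inl hs)
        · exact Or.inl (Or.inr hx)
        · exact Or.inr ⟨i, hi, hx⟩
  rw [outer]
  rw [Std.HashSet.mem_ofList, List.contains_iff_mem]
  unfold pvInit
  constructor
  · rintro (hs | ⟨i, hi, hx⟩)
    · rw [PySem.List.mem_pyRange_one] at hs; omega
    · rw [PySem.List.mem_pyRange_iff_of_pos (by norm_num)] at hi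
      rcases hi with ⟨h6, hlt, hdvd⟩
      have : (6:Int) ∣ i - 6 := hdvd
      right; right
      constructor
      · omega
      constructor
      · omega
      · rcases hx with ⟨h5 | h5, _⟩ <;> omega
  · rintro (rfl | rfl | ⟨h5, hle, hm⟩)
    · left; rw [PySem.List.mem_pyRange_one]; omega
    · left; rw [PySem.List.mem_pyRange_one]; omega
    · right
      rcases hm with hm | hm
      · refine ⟨n - 1, ?_, Or.inr (by ring), hle⟩
        rw [PySem.List.mem_pyRange_iff_of_pos (by norm_num)]
        refine ⟨by omega, by omega, by omega⟩
      · refine ⟨n + 1, ?_, Or.inl (by ring), hle⟩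
        rw [PySem.List.mem_pyRange_iff_of_pos (by norm_num)]
        refine ⟨by omega, by omega, by omega⟩

theorem pv_rem_ext (mr a b n : Int) (hab : a ≤ b)
    (hgap : ∀ e : Int, a ≤ e → e < b → 2 ≤ e → ¬ e.natAbs.Prime) :
    pvRem mr b n ↔ pvRem mr a n := by
  unfold pvRem
  constructor
  · rintro ⟨d, h1, h2, h3, h4, h5, h6⟩
    by_cases hda : d < a
    · exact ⟨d, h1, hda, h3, h4, h5, h6⟩
    · exact absurd h4 (hgap d (by omega) h2 h1)
  · rintro ⟨d, h1, h2, h3, h4, h5, h6⟩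
    exact ⟨d, h1, by omega, h3, h4, h5, h6⟩

-- one body of the while loop: s1 is characterized with the bound advanced from p to p+1

theorem pv_step_char (mx mr p : Int) (s : Std.HashSet Int)
    (hple : p ≤ mr) (hp2 : 2 ≤ p) (hInitp : pvInit mx p)
    (hs : ∀ n, n ∈ s ↔ pvInit mx n ∧ ¬ pvRem mr p n) :
    ∀ n, n ∈ (if s.contains p then pvSieveStep mx s p else s) ↔
      pvInit mx n ∧ ¬ pvRem mr (p+1) n := by
  intro n
  by_cases hp : p.natAbs.Prime
  · have hmem : p ∈ s := by
      rw [hs]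
      refine ⟨hInitp, ?_⟩
      rintro ⟨d, h1, h2, h3, h4, h5, h6⟩
      exact pv_prime_no_div p d hp hp2 h1 h5 h6
    rw [if_pos (Std.HashSet.contains_iff_mem.mpr hmem)]
    rw [pv_mem_sieveStep mx s p n (by omega), hs]
    constructor
    · rintro ⟨⟨hI, hR⟩, hX⟩
      refine ⟨hI, ?_⟩
      rintro ⟨d, h1, h2, h3, h4, h5, h6⟩
      by_cases hdp : d < p
      · exact hR ⟨d, h1, hdp, h3, h4, h5, h6⟩
      · have hd : d = p := by omega
        subst hd
        have hnmx : n ≤ mx := by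
          rcases hI with rfl | rfl | ⟨_, hmx', _⟩
          · nlinarith
          · nlinarith
          · exact hmx'
        exact hX ⟨h5, hnmx, h6⟩
    · rintro ⟨hI, hR⟩
      refine ⟨⟨hI, fun ⟨d, h1, h2, h3, h4, h5, h6⟩ => hR ⟨d, h1, by omega, h3, h4, h5, h6⟩⟩, ?_⟩
      rintro ⟨h5, h6, h7⟩
      exact hR ⟨p, hp2, by omega, hple, hp, h5, h7⟩
  · have hmem : p ∉ s := by
      rw [hs]
      rintro ⟨hI, hR⟩
      obtain ⟨d, h1, h2, h3, h4, h5⟩ := pv_prime_factor p hp2 hp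
      have hdd : d ≤ d*d := by nlinarith
      exact hR ⟨d, h1, h2, by omega, h3, h4, h5⟩
    have hcf : s.contains p = false :=
      Bool.eq_false_iff.mpr (fun h => hmem (Std.HashSet.contains_iff_mem.mp h))
    rw [hcf]
    simp only [Bool.false_eq_true, if_false]
    rw [hs]
    constructor
    · rintro ⟨hI, hR⟩
      refine ⟨hI, ?_⟩
      rintro ⟨d, h1, h2, h3, h4, h5, h6⟩
      have : d < p := by
        rcases lt_or_ge d p with h | h
        · exact h
        · have : d = p := by omega
          subst this; exact absurd h4 hp
      exact hR ⟨d, h1, this, h3, h4, h5, h6⟩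
    · rintro ⟨hI, hR⟩
      exact ⟨hI, fun ⟨d, h1, h2, h3, h4, h5, h6⟩ => hR ⟨d, h1, by omega, h3, h4, h5, h6⟩⟩

theorem pv_gpLoop_step (mx mr : Int) (fuel : Nat) (s : Std.HashSet Int) (q : List Int)
    (p p' : Int) (q' : List Int) (hple : p ≤ mr)
    (hq1 : (if q.length < 2 then
        (q ++ [q.getLastD 0 + 4]) ++ [(q ++ [q.getLastD 0 + 4]).getLastD 0 + 2]
      else q) = p' :: q') :
    pvGpLoop mx mr (fuel+1) s q p =
      pvGpLoop mx mr fuel (if s.contains p then pvSieveStep mx s p else s) q' p' := by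
  simp only [pvGpLoop, if_pos hple]
  rw [hq1]

theorem pv_gpLoop_char (mx mr : Int) (hmx : 0 ≤ mx) (hmr : 0 ≤ mr) (hmrmx : mr ≤ mx) :
    ∀ (fuel : Nat) (p : Int) (q : List Int) (s : Std.HashSet Int),
    pvQInv p q → (mr + 2 - p).toNat ≤ fuel →
    (∀ n, n ∈ s ↔ pvInit mx n ∧ ¬ pvRem mr p n) →
    ∀ n, n ∈ pvGpLoop mx mr fuel s q p ↔ (pvInit mx n ∧ ¬ pvRem mr (mr+1) n) := by
  intro fuel
  induction fuel with
  | zero =>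
    intro p q s hq hfuel hs n
    simp only [pvGpLoop]
    rw [hs]
    have hiff : pvRem mr p n ↔ pvRem mr (mr+1) n := by
      unfold pvRem
      constructor
      · rintro ⟨d, h1, h2, h3, h4, h5, h6⟩; exact ⟨d, h1, by omega, h3, h4, h5, h6⟩
      · rintro ⟨d, h1, h2, h3, h4, h5, h6⟩; exact ⟨d, h1, by omega, h3, h4, h5, h6⟩
    rw [hiff]
  | succ fuel ih =>
    intro p q s hq hfuel hs n
    by_cases hple : p ≤ mr
    · have hp2 : 2 ≤ p := by
        rcases hq with ⟨rfl, _⟩ | ⟨rfl, _⟩ | ⟨h, _, _⟩ | ⟨h, _, _⟩ <;> omega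
      have hInitp : pvInit mx p := by
        rcases hq with ⟨rfl, _⟩ | ⟨rfl, _⟩ | ⟨h5, h6, _⟩ | ⟨h5, h6, _⟩
        · exact Or.inl rfl
        · exact Or.inr (Or.inl rfl)
        · exact Or.inr (Or.inr ⟨h5, by omega, Or.inr h6⟩)
        · exact Or.inr (Or.inr ⟨h5, by omega, Or.inl h6⟩)
      have hstep := pv_step_char mx mr p s hple hp2 hInitp hs
      rcases hq with ⟨rfl, rfl⟩ | ⟨rfl, rfl⟩ | ⟨h5, h6, rfl⟩ | ⟨h5, h6, rfl⟩
      · -- p=2, q=[3,5,7] → next p'=3, q'=[5,7]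
        rw [pv_gpLoop_step mx mr fuel s [3,5,7] 2 3 [5,7] hple rfl]
        refine ih 3 [5,7] _ (Or.inr (Or.inl ⟨rfl, rfl⟩)) (by omega) (fun m => ?_) n
        have hre : pvRem mr 3 m ↔ pvRem mr (2+1) m :=
          pv_rem_ext mr (2+1) 3 m (by omega) (fun e he1 he2 he3 => absurd he1 (by omega))
        rw [hstep m, hre]
      · -- p=3, q=[5,7] → next p'=5, q'=[7]
        rw [pv_gpLoop_step mx mr fuel s [5,7] 3 5 [7] hple rfl]
        refine ih 5 [7] _ (Or.inr (Or.inr (Or.inl ⟨by omega, by decide, rfl⟩))) (by omega)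
          (fun m => ?_) n
        have hre : pvRem mr 5 m ↔ pvRem mr (3+1) m := by
          refine pv_rem_ext mr (3+1) 5 m (by omega) ?_
          intro e he1 he2 he3
          have he : e = 4 := by omega
          subst he
          exact pv_not_prime 2 4 (by omega) (by omega) (by omega)
        rw [hstep m, hre]
      · -- p ≡ 5 mod 6, q=[p+2] → appends give q1=[p+2,p+6,p+8]; next p'=p+2
        rw [pv_gpLoop_step mx mr fuel s [p+2] p (p+2) [p+2+4, p+2+4+2] hple rfl]
        have hq' : pvQInv (p+2) [p+2+4, p+2+4+2] := by
          refine Or.inr (Or.inr (Or.inr ⟨by omega, by omega, ?_⟩))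
          have h : p + 2 + 4 + 2 = p + 2 + 6 := by ring
          rw [h]
        refine ih (p+2) [p+2+4, p+2+4+2] _ hq' (by omega) (fun m => ?_) n
        have hre : pvRem mr (p+2) m ↔ pvRem mr (p+1) m := by
          refine pv_rem_ext mr (p+1) (p+2) m (by omega) ?_
          intro e he1 he2 he3
          have he : e = p + 1 := by omega
          subst he
          exact pv_not_prime 2 (p+1) (by omega) (by omega) (by omega)
        rw [hstep m, hre]
      · -- p ≡ 1 mod 6, q=[p+4,p+6] → next p'=p+4, q'=[p+6]
        rw [pv_gpLoop_step mx mr fuel s [p+4,p+6] p (p+4) [p+6] hple rfl]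
        have hq' : pvQInv (p+4) [p+6] := by
          refine Or.inr (Or.inr (Or.inl ⟨by omega, by omega, ?_⟩))
          have h : p + 6 = p + 4 + 2 := by ring
          rw [h]
        refine ih (p+4) [p+6] _ hq' (by omega) (fun m => ?_) n
        have hre : pvRem mr (p+4) m ↔ pvRem mr (p+1) m := by
          refine pv_rem_ext mr (p+1) (p+4) m (by omega) ?_
          intro e he1 he2 he3
          have he : e = p + 1 ∨ e = p + 2 ∨ e = p + 3 := by omega
          rcases he with rfl | rfl | rfl
          · exact pv_not_prime 2 (p+1) (by omega) (by omega) (by omega)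
          · exact pv_not_prime 3 (p+2) (by omega) (by omega) (by omega)
          · exact pv_not_prime 2 (p+3) (by omega) (by omega) (by omega)
        rw [hstep m, hre]
    · simp only [pvGpLoop, if_neg hple]
      rw [hs]
      have hiff : pvRem mr p n ↔ pvRem mr (mr+1) n := by
        unfold pvRem
        constructor
        · rintro ⟨d, h1, h2, h3, h4, h5, h6⟩; exact ⟨d, h1, by omega, h3, h4, h5, h6⟩
        · rintro ⟨d, h1, h2, h3, h4, h5, h6⟩; exact ⟨d, h1, by omega, h3, h4, h5, h6⟩
      rw [hiff]

theorem pv_sqrt_le (mx : Int) (hmx : 0 ≤ mx) : Int.sqrt mx ≤ mx := by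
  have h0 := Int.sqrt_nonneg mx
  have h1 : Int.sqrt mx ≤ Int.sqrt mx := le_refl _
  have h2 : Int.sqrt mx * Int.sqrt mx ≤ mx := (pv_le_sqrt mx _ hmx h0).mp h1
  nlinarith

theorem pv_mem_genprimes (mx n : Int) (h : 0 ≤ mx) :
    n ∈ genprimes mx ↔ (n = 2 ∨ n = 3 ∨ (5 ≤ n ∧ n ≤ mx ∧ n.natAbs.Prime)) := by
  unfold genprimes
  rw [List.mem_mergeSort, Std.HashSet.mem_toList]
  set mr := Int.sqrt mx with hmrdef
  have hmr : 0 ≤ mr := Int.sqrt_nonneg mx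
  have hmrmx : mr ≤ mx := pv_sqrt_le mx h
  rw [pv_gpLoop_char mx mr h hmr hmrmx (mr.toNat + 1) 2 [3,5,7] (pvInitSet mx)
    (Or.inl ⟨rfl, rfl⟩) (by omega)
    (fun m => by
      rw [pv_mem_init mx m h]
      constructor
      · intro hI; exact ⟨hI, fun ⟨d, h1, h2, _⟩ => by omega⟩
      · exact fun ⟨hI, _⟩ => hI) n]
  constructor
  · rintro ⟨hI, hR⟩
    rcases hI with rfl | rfl | ⟨h5, hle, hm⟩
    · exact Or.inl rfl
    · exact Or.inr (Or.inl rfl)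
    · refine Or.inr (Or.inr ⟨h5, hle, ?_⟩)
      by_contra hnp
      obtain ⟨d, h1, h2, h3, h4, h5'⟩ := pv_prime_factor n (by omega) hnp
      have hdmr : d ≤ mr := by
        rw [hmrdef, pv_le_sqrt mx d h (by omega)]
        omega
      exact hR ⟨d, h1, by omega, hdmr, h3, h4, h5'⟩
  · rintro (rfl | rfl | ⟨h5, hle, hp⟩)
    · refine ⟨Or.inl rfl, ?_⟩
      rintro ⟨d, h1, h2, h3, h4, h5, h6⟩
      nlinarith
    · refine ⟨Or.inr (Or.inl rfl), ?_⟩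
      rintro ⟨d, h1, h2, h3, h4, h5, h6⟩
      nlinarith
    · refine ⟨Or.inr (Or.inr ⟨h5, hle, pv_prime_mod6 n hp (by omega)⟩), ?_⟩
      rintro ⟨d, h1, h2, h3, h4, h5', h6⟩
      exact pv_prime_no_div n d hp (by omega) h1 h5' h6

theorem pv_tdLoop_iff (n : Int) :
    ∀ (fuel : Nat) (d : Int), 3 ≤ d → d % 2 = 1 → (n + 1 - d).toNat < fuel →
    (pvTdLoop n fuel d = true ↔ ¬ ∃ e : Int, d ≤ e ∧ e % 2 = 1 ∧ e*e ≤ n ∧ e ∣ n) := by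
  intro fuel
  induction fuel with
  | zero => intro d _ _ hfuel; exact absurd hfuel (Nat.not_lt_zero _)
  | succ fuel ih =>
    intro d hd3 hdodd hfuel
    simp only [pvTdLoop]
    by_cases hdd : d*d ≤ n
    · rw [if_pos hdd]
      have hdn : d ≤ n := by nlinarith
      by_cases hmod : PySem.Int.mod n d = 0
      · rw [if_pos hmod]
        have hdvd : d ∣ n := (PySem.Int.mod_eq_zero_iff_dvd n d).mp hmod
        constructor
        · intro hcon; exact absurd hcon (by simp)
        · intro hcon; exact absurd ⟨d, le_refl d, hdodd, hdd, hdvd⟩ hcon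
      · rw [if_neg hmod]
        have hndvd : ¬ d ∣ n := fun hdvd => hmod ((PySem.Int.mod_eq_zero_iff_dvd n d).mpr hdvd)
        rw [ih (d+2) (by omega) (by omega) (by omega)]
        constructor
        · rintro hne ⟨e, he1, he2, he3, he4⟩
          by_cases hed : e = d
          · subst hed; exact hndvd he4
          · have : d + 2 ≤ e := by omega
            exact hne ⟨e, this, he2, he3, he4⟩
        · rintro hne ⟨e, he1, he2, he3, he4⟩
          exact hne ⟨e, by omega, he2, he3, he4⟩
    · rw [if_neg hdd]
      constructor
      · rintro _ ⟨e, he1, he2, he3, he4⟩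
        have : d * d ≤ e * e := by nlinarith
        omega
      · intro _; rfl

theorem pv_isPrime_iff (n : Int) : pvIsPrime n = true ↔ (2 ≤ n ∧ n.natAbs.Prime) := by
  unfold pvIsPrime
  by_cases h4 : n < 4
  · rw [if_pos h4]
    constructor
    · intro h
      have h1 : 1 < n := of_decide_eq_true h
      have : n = 2 ∨ n = 3 := by omega
      rcases this with rfl | rfl
      · exact ⟨by omega, by decide⟩
      · exact ⟨by omega, by decide⟩
    · rintro ⟨h2, _⟩
      exact decide_eq_true (by omega)
  · rw [if_neg h4]
    by_cases hmod : PySem.Int.mod n 2 = 0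
    · rw [if_pos hmod]
      have hdvd : (2:Int) ∣ n := (PySem.Int.mod_eq_zero_iff_dvd n 2).mp hmod
      constructor
      · intro hcon; exact absurd hcon (by simp)
      · rintro ⟨h2, hp⟩
        exact absurd hp (pv_not_prime 2 n (by omega) (by omega) hdvd)
    · rw [if_neg hmod]
      have hn2 : ¬ (2:Int) ∣ n := fun h => hmod ((PySem.Int.mod_eq_zero_iff_dvd n 2).mpr h)
      rw [pv_tdLoop_iff n (n.toNat + 1) 3 (by omega) (by omega) (by omega)]
      constructor
      · intro hne
        refine ⟨by omega, ?_⟩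
        by_contra hnp
        obtain ⟨d, h1, h2, h3, h4, h5⟩ := pv_prime_factor n (by omega) hnp
        have hdodd : d % 2 = 1 := by
          by_contra hde
          have : (2:Int) ∣ d := by omega
          exact hn2 (dvd_trans this h5)
        exact hne ⟨d, by omega, hdodd, h4, h5⟩
      · rintro ⟨h2, hp⟩ ⟨e, he1, he2, he3, he4⟩
        exact pv_prime_no_div n e hp (by omega) (by omega) he3 he4

theorem pv_loops_eq (mx : Int) (hmx : 0 ≤ mx) (ps : Std.HashSet Int)
    (hps : ∀ q : Int, 7 ≤ q → q ≤ mx → (ps.contains q = pvIsPrime q)) :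
    ∀ (fuel : Nat) (y : Int), 1 ≤ y → (mx - y).toNat < fuel →
    pvCubanLoop mx ps (PySem.List.pyRange y (mx+1) 1) = pvAltLoop mx fuel y := by
  intro fuel
  induction fuel with
  | zero => intro y _ hfuel; exact absurd hfuel (Nat.not_lt_zero _)
  | succ fuel ih =>
    intro y hy1 hfuel
    by_cases hy : y ≤ mx
    · rw [PySem.List.pyRange_one_cons (show y < mx + 1 by omega)]
      simp only [pvCubanLoop, pvAltLoop]
      by_cases hq : 3*y*(y+1)+1 > mx
      · rw [if_pos hq, if_neg (by omega)]
      · rw [if_neg hq, if_pos (show 3*y*(y+1)+1 ≤ mx by omega)]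
        have h7 : 7 ≤ 3*y*(y+1)+1 := by nlinarith
        rw [hps _ h7 (by omega)]
        have hylt : y < mx := by nlinarith
        rw [ih (y+1) (by omega) (by omega)]
    · have hempty : PySem.List.pyRange y (mx+1) 1 = [] := by
        rw [PySem.List.pyRange_one]
        rw [show (mx + 1 - y).toNat = 0 by omega]
        rfl
      rw [hempty]
      simp only [pvCubanLoop, pvAltLoop]
      rw [if_neg (show ¬ 3*y*(y+1)+1 ≤ mx by nlinarith)]

theorem cuban1_eq (mx : Int) (hmx : 0 ≤ mx) : cuban1 mx = cuban1_alt mx := by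
  unfold cuban1 cuban1_alt
  refine pv_loops_eq mx hmx _ (fun q h7 hle => ?_) (mx.toNat + 1) 1 (by omega) (by omega)
  rw [Bool.eq_iff_iff]
  rw [Std.HashSet.contains_iff_mem, Std.HashSet.mem_ofList, List.contains_iff_mem,
    pv_mem_genprimes mx q hmx, pv_isPrime_iff]
  constructor
  · rintro (rfl | rfl | ⟨h5, _, hp⟩)
    · omega
    · omega
    · exact ⟨by omega, hp⟩
  · rintro ⟨h2, hp⟩
    exact Or.inr (Or.inr ⟨by omega, hle, hp⟩)

-- ===== VERDICT (by name: the statement is the Claim_ definition above) =====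
theorem cuban1_spec : Claim_equal_cuban1 := by
  intro mx _ hpre
  unfold Pre_cuban1 at hpre
  unfold Spec_cuban1
  exact cuban1_eq mx hpre
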